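-- pv_equiv track=rewrite | github.com/alexlux58/WorkCenter | loaded_scripts/IPScanner.py | get_host
-- ===== SOURCE A (Python) =====
-- def get_host(x):
--     dot_counter = 0
--     pos_counter = 0
--     for i in x:
--         if i == ".":
--             dot_counter = dot_counter + 1
--         if dot_counter == 3:
--             return (x[0:pos_counter+1], x[pos_counter+1:])
--         pos_counter += 1
-- ===== SOURCE B (Python) =====
-- def get_host(x):
--     parts = x.split('.', 3)
--     if len(parts) < 4:
--         return None
--     return ('.'.join(parts[:3]) + '.', parts[3])
-- ===== Notes on version B (the rewrite author's own statement) =====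
-- stated objective: idiomatic
-- what changed: Replaces the manual per-character dot-counting loop with a bounded split (maxsplit 3) and reassembly of the head via join, the way a Python developer would write it; the C-level split also makes it measurably faster.
import Mathlib
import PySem

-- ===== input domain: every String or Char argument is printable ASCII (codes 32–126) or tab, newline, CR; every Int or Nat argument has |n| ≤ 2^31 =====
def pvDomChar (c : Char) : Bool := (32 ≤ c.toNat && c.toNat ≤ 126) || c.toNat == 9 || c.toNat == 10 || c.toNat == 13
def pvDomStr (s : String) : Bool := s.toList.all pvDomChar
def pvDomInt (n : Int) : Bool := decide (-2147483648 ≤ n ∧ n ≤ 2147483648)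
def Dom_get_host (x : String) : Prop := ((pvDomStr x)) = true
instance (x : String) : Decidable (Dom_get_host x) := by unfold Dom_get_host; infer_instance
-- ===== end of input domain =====

-- B replaces A's manual character-counting loop by split('.', 3) and reassembly (idiomatic decomposition, same cost).

-- ===== PORT A =====
-- the for-loop of A: carries dot_counter and pos_counter over the remaining characters
def get_host_go (x : String) (cs : List Char) (dot pos : Nat) : Option (String × String) :=
  match cs with
  | [] => none
  | c :: rest =>
    let dot' := if c = '.' then dot + 1 else dot
    if dot' = 3 then
      some (PySem.Str.slice x (some 0) (some ((pos : Int) + 1)),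
            PySem.Str.slice x (some ((pos : Int) + 1)) none)
    else get_host_go x rest dot' (pos + 1)

def get_host (x : String) : Option (String × String) :=
  get_host_go x x.toList 0 0

-- ===== PORT B =====
def get_host_alt (x : String) : Option (String × String) :=
  match PySem.Str.splitMax? x "." 3 with
  | none => none   -- unreachable: the separator "." is nonempty
  | some parts =>
    if parts.length < 4 then none
    else some (PySem.Str.join "." (PySem.List.slice parts none (some 3)) ++ ".", parts[3]!)

-- ===== PRECONDITION & SPEC =====
def Spec_get_host (x : String) (out : Option (String × String)) : Prop := out = get_host_alt x
instance (x : String) (out : Option (String × String)) : Decidable (Spec_get_host x out) := by unfold Spec_get_host; infer_instance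

-- ===== CLAIM (what is proved, stated in full; the proofs are below) =====
def Claim_equal_get_host : Prop := ∀ (x : String), Dom_get_host x → Spec_get_host x (get_host x)

-- ===== LEMMAS AND PROOFS =====

-- reference splitter: what Python's x.split('.', m) produces, as a plain structural recursion
def mySplit : List Char → Nat → List (List Char)
  | cs, 0 => [cs]
  | [], _ + 1 => [[]]
  | c :: rest, m + 1 =>
    if c = '.' then [] :: mySplit rest m
    else (mySplit rest (m + 1)).modifyHead (c :: ·)

theorem mySplit_ne_nil (cs : List Char) (m : Nat) : mySplit cs m ≠ [] := by
  induction cs generalizing m with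
  | nil => cases m <;> simp [mySplit]
  | cons c rest ih =>
    cases m with
    | zero => simp [mySplit]
    | succ m =>
      simp only [mySplit]
      split
      · simp
      · simp only [ne_eq, List.modifyHead_eq_nil_iff]
        exact ih (m + 1)

theorem mySplit_length_le (cs : List Char) (m : Nat) : (mySplit cs m).length ≤ m + 1 := by
  induction cs generalizing m with
  | nil => cases m <;> simp [mySplit]
  | cons c rest ih =>
    cases m with
    | zero => simp [mySplit]
    | succ m =>
      simp only [mySplit]
      split
      · simpa using ih m
      · simpa using ih (m + 1)

theorem modifyHead_fun_id {α : Type} (l : List α) : List.modifyHead (fun x => x) l = l := by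
  cases l <;> rfl

theorem go_eq_mySplit (cs : List Char) (fuel m : Nat) (cur : List Char)
    (acc : List (List Char)) (hf : cs.length < fuel) :
    PySem.Chars.splitOnMax.go ['.'] fuel m cs cur acc
      = acc.reverse ++ (mySplit cs m).modifyHead (cur.reverse ++ ·) := by
  induction cs generalizing fuel m cur acc with
  | nil =>
    rw [PySem.Chars.splitOnMax.go.eq_def]
    cases fuel with
    | zero => omega
    | succ fuel => cases m <;> simp [mySplit]
  | cons c rest ih =>
    cases fuel with
    | zero => omega
    | succ fuel =>
      rw [PySem.Chars.splitOnMax.go.eq_def]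
      cases m with
      | zero => simp [mySplit]
      | succ m =>
        simp only [Nat.succ_ne_zero, if_false, Nat.add_sub_cancel]
        by_cases hc : c = '.'
        · subst hc
          have hpre : List.isPrefixOf ['.'] ('.' :: rest) = true := by simp [List.isPrefixOf]
          rw [if_pos hpre]
          have hdrop : List.drop (['.'] : List Char).length ('.' :: rest) = rest := rfl
          rw [hdrop]
          rw [ih fuel m [] (cur.reverse :: acc) (by simpa using Nat.lt_of_succ_lt_succ hf)]
          simp [mySplit, modifyHead_fun_id]
        · have hpre : List.isPrefixOf ['.'] (c :: rest) = false := by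
            simp [List.isPrefixOf]
            exact fun h => hc h.symm
          rw [if_neg (by simp [hpre])]
          rw [ih fuel (m + 1) (c :: cur) acc (by simpa using Nat.lt_of_succ_lt_succ hf)]
          simp only [mySplit, if_neg hc]
          obtain ⟨h, t, hht⟩ : ∃ h t, mySplit rest (m + 1) = h :: t := by
            cases hP : mySplit rest (m + 1) with
            | nil => exact absurd hP (mySplit_ne_nil rest (m + 1))
            | cons h t => exact ⟨h, t, rfl⟩
          simp [hht]

theorem splitOnMax_eq (cs : List Char) :
    PySem.Chars.splitOnMax cs ['.'] 3 = mySplit cs 3 := by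
  rw [PySem.Chars.splitOnMax]
  rw [if_neg (by norm_num)]
  have h3 : (Int.toNat 3) = 3 := rfl
  rw [h3]
  rw [go_eq_mySplit cs (cs.length + 1) 3 [] [] (by omega)]
  simp only [List.reverse_nil, List.nil_append]
  exact modifyHead_fun_id _

theorem intercalate_mySplit (cs : List Char) (m : Nat) :
    List.intercalate ['.'] (mySplit cs m) = cs := by
  induction cs generalizing m with
  | nil => cases m <;> simp [mySplit, List.intercalate]
  | cons c rest ih =>
    cases m with
    | zero => simp [mySplit, List.intercalate]
    | succ m =>
      simp only [mySplit]
      by_cases hc : c = '.'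
      · subst hc
        rw [if_pos rfl]
        obtain ⟨h, t, hht⟩ : ∃ h t, mySplit rest m = h :: t := by
          cases hP : mySplit rest m with
          | nil => exact absurd hP (mySplit_ne_nil rest m)
          | cons h t => exact ⟨h, t, rfl⟩
        have := ih m
        rw [hht] at this ⊢
        simp only [List.intercalate, List.intersperse] at this ⊢
        simp_all
      · rw [if_neg hc]
        obtain ⟨h, t, hht⟩ : ∃ h t, mySplit rest (m + 1) = h :: t := by
          cases hP : mySplit rest (m + 1) with
          | nil => exact absurd hP (mySplit_ne_nil rest (m + 1))
          | cons h t => exact ⟨h, t, rfl⟩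
        have := ih (m + 1)
        rw [hht] at this ⊢
        cases t with
        | nil => simp_all [List.intercalate]
        | cons b t => simp_all [List.intercalate]

-- the common value of both sides, expressed over the reference split
def outOf (x : String) (pos m : Nat) (parts : List (List Char)) : Option (String × String) :=
  if parts.length = m + 1 then
    some (String.ofList (x.toList.take (pos + ((parts.take m).map List.length).sum + m)),
          String.ofList (x.toList.drop (pos + ((parts.take m).map List.length).sum + m)))
  else none

theorem slice_head (x : String) (pos : Nat) :
    PySem.Str.slice x (some 0) (some ((pos : Int) + 1)) = String.ofList (x.toList.take (pos + 1)) := by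
  rw [PySem.Str.slice]
  simp only [PySem.Chars.slice_eq_listSlice, PySem.List.slice_zero_start]
  rw [PySem.List.slice_to x.toList (by positivity)]
  have h : ((pos : Int) + 1).toNat = pos + 1 := by omega
  rw [h]

theorem slice_tail (x : String) (pos : Nat) :
    PySem.Str.slice x (some ((pos : Int) + 1)) none = String.ofList (x.toList.drop (pos + 1)) := by
  rw [PySem.Str.slice]
  simp only [PySem.Chars.slice_eq_listSlice]
  rw [PySem.List.slice_from x.toList (by positivity)]
  have h : ((pos : Int) + 1).toNat = pos + 1 := by omega
  rw [h]

theorem go_eq_outOf (x : String) (cs : List Char) (pos m : Nat) (h1 : 1 ≤ m) (h3 : m ≤ 3) :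
    get_host_go x cs (3 - m) pos = outOf x pos m (mySplit cs m) := by
  induction cs generalizing pos m with
  | nil =>
    cases m with
    | zero => omega
    | succ m => simp [get_host_go, mySplit, outOf]
  | cons c rest ih =>
    cases m with
    | zero => omega
    | succ m =>
      by_cases hc : c = '.'
      · subst hc
        cases m with
        | zero =>
          have hL : get_host_go x ('.' :: rest) (3 - 1) pos
              = some (PySem.Str.slice x (some 0) (some ((pos : Int) + 1)),
                      PySem.Str.slice x (some ((pos : Int) + 1)) none) := by
            simp [get_host_go]
          rw [hL, slice_head, slice_tail]
          have hR : mySplit ('.' :: rest) 1 = [[], rest] := by simp [mySplit]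
          rw [hR, outOf]
          norm_num
        | succ m =>
          have hd : 3 - (m + 1 + 1) + 1 = 3 - (m + 1) := by omega
          have hne : 3 - (m + 1 + 1) + 1 ≠ 3 := by omega
          have hL : get_host_go x ('.' :: rest) (3 - (m + 1 + 1)) pos
              = get_host_go x rest (3 - (m + 1)) (pos + 1) := by
            simp only [get_host_go]
            simp only [if_true]
            rw [if_neg hne, hd]
          rw [hL, ih (pos + 1) (m + 1) (by omega) (by omega)]
          have hR : mySplit ('.' :: rest) (m + 1 + 1) = [] :: mySplit rest (m + 1) := by
            simp [mySplit]
          rw [hR]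
          simp only [outOf, List.length_cons]
          by_cases hl : (mySplit rest (m + 1)).length = m + 1 + 1
          · rw [if_pos hl, if_pos (by omega)]
            simp only [List.take_succ_cons, List.map_cons, List.sum_cons, List.length_nil]
            have : pos + 1 + ((List.take (m + 1) (mySplit rest (m + 1))).map List.length).sum + (m + 1)
                 = pos + (0 + ((List.take (m + 1) (mySplit rest (m + 1))).map List.length).sum) + (m + 1 + 1) := by omega
            rw [this]
          · rw [if_neg hl, if_neg (by omega)]
      · have hne : 3 - (m + 1) ≠ 3 := by omega
        have hL : get_host_go x (c :: rest) (3 - (m + 1)) pos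
            = get_host_go x rest (3 - (m + 1)) (pos + 1) := by
          simp [get_host_go, hc]
          intro h
          omega
        rw [hL, ih (pos + 1) (m + 1) (by omega) (by omega)]
        have hR : mySplit (c :: rest) (m + 1) = (mySplit rest (m + 1)).modifyHead (c :: ·) := by
          simp [mySplit, hc]
        rw [hR]
        obtain ⟨h, t, hht⟩ : ∃ h t, mySplit rest (m + 1) = h :: t := by
          cases hP : mySplit rest (m + 1) with
          | nil => exact absurd hP (mySplit_ne_nil rest (m + 1))
          | cons h t => exact ⟨h, t, rfl⟩
        rw [hht]
        simp only [List.modifyHead, outOf, List.length_cons]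
        by_cases hl : t.length + 1 = m + 1 + 1
        · rw [if_pos hl, if_pos hl]
          simp only [List.take_succ_cons, List.map_cons, List.sum_cons, List.length_cons]
          have : pos + 1 + (h.length + ((List.take m t).map List.length).sum) + (m + 1)
               = pos + (h.length + 1 + ((List.take m t).map List.length).sum) + (m + 1) := by omega
          rw [this]
        · rw [if_neg hl, if_neg hl]

theorem get_host_spec_aux (x : String) : get_host x = get_host_alt x := by
  rw [get_host, get_host_alt]
  have h0 : (0 : Nat) = 3 - 3 := rfl
  rw [h0, go_eq_outOf x x.toList 0 3 (by omega) (by omega)]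
  have hsep : (".".toList) = ['.'] := rfl
  rw [PySem.Str.splitMax?, PySem.Chars.splitMax?, hsep]
  rw [if_neg (by simp), splitOnMax_eq]
  simp only [Option.map_some]
  obtain ⟨P, hPdef⟩ : ∃ P, mySplit x.toList 3 = P := ⟨_, rfl⟩
  rw [hPdef]
  have hle : P.length ≤ 4 := hPdef ▸ mySplit_length_le x.toList 3
  have hx : List.intercalate ['.'] P = x.toList := hPdef ▸ intercalate_mySplit x.toList 3
  simp only [List.length_map]
  by_cases hl : P.length = 4
  · obtain ⟨p0, p1, p2, p3, rfl⟩ : ∃ p0 p1 p2 p3, P = [p0, p1, p2, p3] := by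
      match P, hl with
      | [p0, p1, p2, p3], _ => exact ⟨p0, p1, p2, p3, rfl⟩
    rw [outOf, if_pos hl]
    rw [if_neg (by omega)]
    have hxeq : x.toList = (p0 ++ '.' :: p1 ++ '.' :: p2 ++ ['.']) ++ p3 := by
      rw [← hx]
      simp [List.intercalate, List.intersperse]
    have hlen : (p0 ++ '.' :: p1 ++ '.' :: p2 ++ ['.']).length
        = 0 + (([p0, p1, p2, p3].take 3).map List.length).sum + 3 := by
      simp [List.length_append]; omega
    have htake : x.toList.take (0 + (([p0, p1, p2, p3].take 3).map List.length).sum + 3)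
        = p0 ++ '.' :: p1 ++ '.' :: p2 ++ ['.'] := by
      rw [hxeq]; exact List.take_left' hlen
    have hdrop : x.toList.drop (0 + (([p0, p1, p2, p3].take 3).map List.length).sum + 3) = p3 := by
      rw [hxeq]; exact List.drop_left' hlen
    rw [htake, hdrop]
    have hslice : PySem.List.slice ([p0, p1, p2, p3].map String.ofList) none (some 3)
        = [String.ofList p0, String.ofList p1, String.ofList p2] := by
      have := PySem.List.slice_to_natCast ([p0, p1, p2, p3].map String.ofList) 3
      simpa using this
    rw [hslice]
    have hjoin : PySem.Str.join "." [String.ofList p0, String.ofList p1, String.ofList p2]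
        = String.ofList (p0 ++ '.' :: p1 ++ '.' :: p2) := by
      rw [PySem.Str.join]
      simp [PySem.Chars.join, List.intercalate, List.intersperse, String.toList_ofList]
    rw [hjoin]
    have hdot : ("." : String) = String.ofList ['.'] := rfl
    rw [hdot, String.ofList_append]
    have hget : (([p0, p1, p2, p3].map String.ofList))[3]! = String.ofList p3 := by
      simp
    rw [hget]
  · rw [outOf, if_neg hl, if_pos (by omega)]

-- ===== VERDICT (by name: the statement is the Claim_ definition above) =====
theorem get_host_spec : Claim_equal_get_host := by
  intro x _
  unfold Spec_get_host
  exact get_host_spec_aux x
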